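-- pv_equiv track=rewrite | github.com/helpingstar/algorithmstudy | python/Solved_Problem/BOJ_2879.py | cal_tab
-- ===== SOURCE A (Python) =====
-- def cal_tab(in_list):
--     if len(in_list) == 0:
--         return 0
--     elif len(in_list) == 1:
--         return in_list[0]
--     else:
--         result = 0
--         min_value = min(in_list)
--         min_index = in_list.index(min_value)
--         result += min_value
--         result += max(0, cal_tab(in_list[:min_index]) - min_value)
--         result += max(0, cal_tab(in_list[min_index+1:]) - min_value)
--         return result
-- ===== SOURCE B (Python) =====
-- def _node(v, left, right):
--     # value of a subtree: root v, optional child values (None = empty side)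
--     if left is None and right is None:
--         return v
--     return v + max(0, (left or 0) - v) + max(0, (right or 0) - v)
--
--
-- def cal_tab(in_list):
--     # One O(n) pass: evaluate the split-at-minimum recurrence bottom-up over
--     # the min-Cartesian tree, built with a monotone stack.
--     stack = []  # (value, value of its left subtree or None), increasing values
--     for x in in_list:
--         left = None
--         while stack and stack[-1][0] > x:
--             v, vl = stack.pop()
--             left = _node(v, vl, left)
--         stack.append((x, left))
--     right = None
--     while stack:
--         v, vl = stack.pop()
--         right = _node(v, vl, right)
--     return 0 if right is None else right
-- ===== Notes on version B (the rewrite author's own statement) =====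
-- stated objective: faster
-- what changed: Replaced the top-down split-at-first-minimum recursion (which rescans each segment for its minimum) with a single left-to-right monotone-stack pass that evaluates the same recurrence bottom-up over the min-Cartesian tree.
import Mathlib
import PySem

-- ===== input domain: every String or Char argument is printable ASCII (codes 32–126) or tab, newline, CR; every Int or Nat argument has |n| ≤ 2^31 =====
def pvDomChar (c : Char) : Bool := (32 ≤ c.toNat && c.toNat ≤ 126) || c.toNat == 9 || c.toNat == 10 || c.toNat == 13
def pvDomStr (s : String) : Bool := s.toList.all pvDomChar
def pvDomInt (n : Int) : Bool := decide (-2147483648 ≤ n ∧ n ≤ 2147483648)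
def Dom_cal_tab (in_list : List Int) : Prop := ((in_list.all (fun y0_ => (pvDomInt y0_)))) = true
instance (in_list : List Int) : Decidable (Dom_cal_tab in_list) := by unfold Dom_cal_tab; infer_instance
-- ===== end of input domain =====

-- B evaluates the same split-at-minimum recurrence bottom-up over the
-- min-Cartesian tree with a monotone stack in one O(n) pass, instead of A's
-- top-down recursion that rescans each segment for its minimum.

-- ===== PORT A =====
def cal_tab (in_list : List Int) : Int :=
  if in_list.length = 0 then 0
  else if in_list.length = 1 then PySem.List.pyGetD in_list 0 0
  else
    match _hm : PySem.List.min? in_list (fun x => x) with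
    | none => 0
    | some m =>
      match _hk : PySem.List.index? in_list m with
      | none => 0
      | some k =>
        m + max 0 (cal_tab (PySem.List.slice in_list none (some (k : Int))) - m)
          + max 0 (cal_tab (PySem.List.slice in_list (some ((k : Int) + 1)) none) - m)
termination_by in_list.length
decreasing_by
  · obtain ⟨hklt, -, -⟩ := PySem.List.getElem_of_index?_eq_some _hk
    simp [PySem.List.slice_to_natCast]
    omega
  · obtain ⟨hklt, -, -⟩ := PySem.List.getElem_of_index?_eq_some _hk
    have : ((k : Int) + 1) = ((k + 1 : Nat) : Int) := by push_cast; ring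
    rw [this, PySem.List.slice_from_natCast]
    simp
    omega

-- ===== PORT B =====
-- _node(v, left, right): value of a subtree (none = empty side)
def node (v : Int) (l r : Option Int) : Int :=
  match l, r with
  | none, none => v
  | _, _ => v + max 0 (l.getD 0 - v) + max 0 (r.getD 0 - v)

-- the inner 'while stack and stack[-1][0] > x' loop; acc is 'left'
def popWhile (x : Int) (st : List (Int × Option Int)) (acc : Option Int) :
    List (Int × Option Int) × Option Int :=
  match st with
  | [] => ([], acc)
  | (v, vl) :: rest => if x < v then popWhile x rest (some (node v vl acc)) else (st, acc)

-- the 'for x in in_list' loop (stack top at the head)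
def goStack (st : List (Int × Option Int)) : List Int → List (Int × Option Int)
  | [] => st
  | x :: xs =>
    let p := popWhile x st none
    goStack ((x, p.2) :: p.1) xs

-- the final 'while stack' loop; acc is 'right'
def finishStack (st : List (Int × Option Int)) (acc : Option Int) : Option Int :=
  match st with
  | [] => acc
  | (v, vl) :: rest => finishStack rest (some (node v vl acc))

def cal_tab_alt (in_list : List Int) : Int :=
  (finishStack (goStack [] in_list) none).getD 0

-- ===== PRECONDITION & SPEC =====
def Spec_cal_tab (in_list : List Int) (out : Int) : Prop := out = cal_tab_alt in_list
instance (in_list : List Int) (out : Int) : Decidable (Spec_cal_tab in_list out) := by unfold Spec_cal_tab; infer_instance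

-- ===== CLAIM (what is proved, stated in full; the proofs are below) =====
def Claim_equal_cal_tab : Prop := ∀ (in_list : List Int), Dom_cal_tab in_list → Spec_cal_tab in_list (cal_tab in_list)

-- ===== LEMMAS AND PROOFS =====

-- unfolding lemma for A on lists of length ≥ 2
theorem cal_tab_two (l : List Int) (m : Int) (k : Nat)
    (h2 : 2 ≤ l.length)
    (hm : PySem.List.min? l (fun x => x) = some m)
    (hk : PySem.List.index? l m = some k) :
    cal_tab l = m + max 0 (cal_tab (l.take k) - m) + max 0 (cal_tab (l.drop (k + 1)) - m) := by
  rw [cal_tab.eq_def]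
  rw [if_neg (by omega), if_neg (by omega)]
  split
  · rename_i hm'
    rw [hm] at hm'
    cases hm'
  · rename_i m' hm'
    rw [hm] at hm'
    cases hm'
    split
    · rename_i hk'
      rw [hk] at hk'
      cases hk'
    · rename_i k' hk'
      rw [hk] at hk'
      cases hk'
      have e1 : PySem.List.slice l none (some (k : Int)) = l.take k :=
        PySem.List.slice_to_natCast ..
      have e2 : PySem.List.slice l (some ((k : Int) + 1)) none = l.drop (k + 1) := by
        have : ((k : Int) + 1) = ((k + 1 : Nat) : Int) := by push_cast; ring
        rw [this, PySem.List.slice_from_natCast]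
      rw [e1, e2]

theorem cal_tab_nil : cal_tab [] = 0 := by
  rw [cal_tab.eq_def]; simp

theorem cal_tab_one (x : Int) : cal_tab [x] = x := by
  rw [cal_tab.eq_def]; simp [PySem.List.pyGetD]

-- every value on the stack produced by goStack comes from the old stack or the input
theorem popWhile_sublist (x : Int) (st : List (Int × Option Int)) (acc : Option Int) :
    ∀ e ∈ (popWhile x st acc).1, e ∈ st := by
  induction st generalizing acc with
  | nil => simp [popWhile]
  | cons hd rest ih =>
    obtain ⟨v, vl⟩ := hd
    intro e he
    by_cases h : x < v
    · simp only [popWhile, if_pos h] at he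
      exact List.mem_cons_of_mem _ (ih _ e he)
    · simp only [popWhile, if_neg h] at he
      exact he

theorem goStack_values (l : List Int) :
    ∀ st, (∀ e ∈ st, e.1 ∈ st.map Prod.fst) →
    ∀ e ∈ goStack st l, e.1 ∈ st.map Prod.fst ∨ e.1 ∈ l := by
  induction l with
  | nil => intro st _ e he; exact Or.inl (List.mem_map_of_mem he)
  | cons x xs ih =>
    intro st _ e he
    simp only [goStack] at he
    have := ih ((x, (popWhile x st none).2) :: (popWhile x st none).1)
      (fun e he => List.mem_map_of_mem he) e he
    rcases this with h | h
    · simp only [List.map_cons, List.mem_cons] at h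
      rcases h with h | h
      · exact Or.inr (by simp [h])
      · obtain ⟨e', he', heq⟩ := List.mem_map.mp h
        rw [← heq]
        exact Or.inl (List.mem_map_of_mem (popWhile_sublist x st none e' he'))
    · exact Or.inr (List.mem_cons_of_mem _ h)

-- if every stack value is > m, popWhile m drains the whole stack like finishStack
theorem popWhile_drain (m : Int) (st : List (Int × Option Int)) (acc : Option Int)
    (h : ∀ e ∈ st, m < e.1) :
    popWhile m st acc = ([], finishStack st acc) := by
  induction st generalizing acc with
  | nil => rfl
  | cons hd rest ih =>
    obtain ⟨v, vl⟩ := hd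
    have hv : m < v := h (v, vl) (by simp)
    simp only [popWhile, if_pos hv, finishStack]
    exact ih _ (fun e he => h e (List.mem_cons_of_mem _ he))

-- a bottom entry whose value is ≤ x is inert for popWhile
theorem popWhile_append (x : Int) (S : List (Int × Option Int)) (b : Int × Option Int)
    (acc : Option Int) (hb : ¬ x < b.1) :
    popWhile x (S ++ [b]) acc = ((popWhile x S acc).1 ++ [b], (popWhile x S acc).2) := by
  induction S generalizing acc with
  | nil =>
    obtain ⟨v, vl⟩ := b
    simp only [popWhile, List.nil_append]
    rw [if_neg hb]
  | cons hd rest ih =>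
    obtain ⟨v, vl⟩ := hd
    by_cases h : x < v
    · simp only [popWhile, List.cons_append, if_pos h]
      exact ih _
    · simp only [popWhile, List.cons_append, if_neg h]

-- a bottom entry whose value is ≤ everything in l is inert for the whole pass
theorem goStack_append (l : List Int) :
    ∀ (S : List (Int × Option Int)) (b : Int × Option Int), (∀ x ∈ l, ¬ x < b.1) →
    goStack (S ++ [b]) l = goStack S l ++ [b] := by
  induction l with
  | nil => intro S b _; rfl
  | cons x xs ih =>
    intro S b h
    simp only [goStack]
    rw [popWhile_append x S b none (h x (by simp))]
    exact ih ((x, (popWhile x S none).2) :: (popWhile x S none).1) b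
      (fun y hy => h y (List.mem_cons_of_mem _ hy))

theorem finishStack_append (S T : List (Int × Option Int)) (acc : Option Int) :
    finishStack (S ++ T) acc = finishStack T (finishStack S acc) := by
  induction S generalizing acc with
  | nil => rfl
  | cons hd rest ih =>
    obtain ⟨v, vl⟩ := hd
    simp only [finishStack, List.cons_append]
    exact ih _

theorem goStack_ne_nil (l : List Int) (st : List (Int × Option Int)) (h : l ≠ []) :
    goStack st l ≠ [] := by
  induction l generalizing st with
  | nil => exact absurd rfl h
  | cons x xs ih =>
    simp only [goStack]
    cases xs with
    | nil => simp [goStack]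
    | cons y ys => exact ih _ (by simp)

theorem finishStack_ne_none (st : List (Int × Option Int)) (acc : Option Int)
    (h : st ≠ []) : finishStack st acc ≠ none := by
  induction st generalizing acc with
  | nil => exact absurd rfl h
  | cons hd rest ih =>
    obtain ⟨v, vl⟩ := hd
    cases rest with
    | nil => simp [finishStack]
    | cons b bs => exact ih _ (by simp)

-- the optional result of the whole pass
def altOpt (l : List Int) : Option Int := finishStack (goStack [] l) none

theorem altOpt_nil : altOpt [] = none := rfl

theorem altOpt_eq_some (l : List Int) (h : l ≠ []) : altOpt l = some (cal_tab_alt l) := by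
  unfold altOpt cal_tab_alt
  have := finishStack_ne_none (goStack [] l) none (goStack_ne_nil l [] h)
  cases hx : finishStack (goStack [] l) none with
  | none => exact absurd hx this
  | some v => rfl

-- the key split: running the pass on pre ++ m :: suf, where pre is strictly
-- above m and suf is at least m, combines the two sub-passes through `node`
theorem altOpt_split (pre suf : List Int) (m : Int)
    (hpre : ∀ x ∈ pre, m < x) (hsuf : ∀ x ∈ suf, m ≤ x) :
    altOpt (pre ++ m :: suf) = some (node m (altOpt pre) (altOpt suf)) := by
  unfold altOpt
  have hgo : goStack [] (pre ++ m :: suf)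
      = goStack [(m, finishStack (goStack [] pre) none)] suf := by
    induction pre with
    | nil =>
      simp only [List.nil_append, goStack, popWhile, finishStack]
    | cons p ps ihp =>
      -- instead of induction on pre, use the generic facts directly
      clear ihp
      -- values on goStack [] (p :: ps) are all from p :: ps hence > m
      have hvals : ∀ e ∈ goStack [] (p :: ps), m < e.1 := by
        intro e he
        have := goStack_values (p :: ps) [] (by simp) e he
        rcases this with h | h
        · simp at h
        · exact hpre e.1 h
      -- generic: goStack st (l1 ++ x :: l2) = goStack (step) ...
      have : ∀ (l1 : List Int) (st : List (Int × Option Int)),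
          goStack st (l1 ++ m :: suf)
            = goStack ((m, (popWhile m (goStack st l1) none).2)
                :: (popWhile m (goStack st l1) none).1) suf := by
        intro l1
        induction l1 with
        | nil => intro st; rfl
        | cons a as iha =>
          intro st
          simp only [List.cons_append, goStack]
          exact iha _
      rw [this (p :: ps) []]
      rw [popWhile_drain m (goStack [] (p :: ps)) none hvals]
  rw [hgo]
  have hko : goStack [(m, finishStack (goStack [] pre) none)] suf
      = goStack [] suf ++ [(m, finishStack (goStack [] pre) none)] := by
    have := goStack_append suf [] (m, finishStack (goStack [] pre) none)
      (fun x hx => not_lt.mpr (hsuf x hx))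
    simpa using this
  rw [hko, finishStack_append]
  rfl

theorem main_eq (l : List Int) : cal_tab l = cal_tab_alt l := by
  suffices H : ∀ n (l : List Int), l.length ≤ n → cal_tab l = cal_tab_alt l from
    H l.length l le_rfl
  intro n
  induction n with
  | zero =>
    intro l hl
    obtain rfl : l = [] := List.eq_nil_of_length_eq_zero (by omega)
    rw [cal_tab_nil]; rfl
  | succ n ih =>
    intro l hl
    match l, hl with
    | [], _ => rw [cal_tab_nil]; rfl
    | [x], _ =>
      rw [cal_tab_one]
      show x = (finishStack (goStack [] [x]) none).getD 0
      simp [goStack, popWhile, finishStack, node]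
    | (a :: b :: t), hl =>
      set l := a :: b :: t with hldef
      have h2 : 2 ≤ l.length := by simp [hldef]
      have hne : l ≠ [] := by simp [hldef]
      obtain ⟨m, hm⟩ := Option.isSome_iff_exists.mp (by
        rw [Option.isSome_iff_ne_none]
        intro hc
        exact hne ((PySem.List.min?_eq_none_iff _ _).mp hc) :
        (PySem.List.min? l (fun x => x)).isSome = true)
      have hmem : m ∈ l := PySem.List.min?_mem hm
      have hmin : ∀ x ∈ l, m ≤ x := fun x hx => PySem.List.min?_isMin hm x hx
      obtain ⟨k, hk⟩ := Option.isSome_iff_exists.mp ((PySem.List.index?_isSome_iff l m).mpr hmem)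
      obtain ⟨pre, suf, hsplit, hklen, hnotpre⟩ := (PySem.List.index?_eq_some_iff l m k).mp hk
      have hpre : ∀ x ∈ pre, m < x := by
        intro x hx
        refine lt_of_le_of_ne (hmin x (by rw [hsplit]; exact List.mem_append_left _ hx)) ?_
        intro hx'
        exact hnotpre (hx' ▸ hx)
      have hsuf : ∀ x ∈ suf, m ≤ x := by
        intro x hx
        exact hmin x (by rw [hsplit]; exact List.mem_append_right _ (List.mem_cons_of_mem _ hx))
      have htake : l.take k = pre := by rw [hsplit, ← hklen]; exact List.take_left
      have hdrop : l.drop (k + 1) = suf := by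
        rw [hsplit, ← hklen]
        have : pre ++ m :: suf = (pre ++ [m]) ++ suf := by simp
        rw [this, show pre.length + 1 = (pre ++ [m]).length by simp]
        exact List.drop_left
      have hlen : l.length = pre.length + suf.length + 1 := by
        rw [hsplit, List.length_append, List.length_cons]
        omega
      rw [cal_tab_two l m k h2 hm hk, htake, hdrop]
      have ihpre : cal_tab pre = cal_tab_alt pre := ih pre (by omega)
      have ihsuf : cal_tab suf = cal_tab_alt suf := ih suf (by omega)
      -- B's side through the split lemma
      have hB : cal_tab_alt l = node m (altOpt pre) (altOpt suf) := by
        have hx : altOpt l = some (node m (altOpt pre) (altOpt suf)) := by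
          rw [hsplit]; exact altOpt_split pre suf m hpre hsuf
        have := altOpt_eq_some l hne
        rw [this] at hx
        exact (Option.some.injEq _ _ ▸ hx : _)
      rw [hB]
      -- both sides are now `node`-shaped; case on emptiness of pre and suf
      cases pre with
      | nil =>
        cases suf with
        | nil =>
          exfalso
          simp only [List.length_nil] at hlen
          omega
        | cons s suf' =>
          rw [cal_tab_nil, ihsuf, altOpt_nil, altOpt_eq_some _ (by simp)]
          rfl
      | cons p pre' =>
        cases suf with
        | nil =>
          rw [cal_tab_nil, ihpre, altOpt_eq_some _ (by simp), altOpt_nil]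
          rfl
        | cons s suf' =>
          rw [ihpre, ihsuf, altOpt_eq_some _ (by simp), altOpt_eq_some _ (by simp)]
          rfl

-- ===== VERDICT (by name: the statement is the Claim_ definition above) =====
theorem cal_tab_spec : Claim_equal_cal_tab := by
  intro l _
  unfold Spec_cal_tab
  exact main_eq l
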